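-- pv_equiv track=rewrite | github.com/nieahaya/analiza | 08.03/struktury.py | pocztapolska
-- ===== SOURCE A (Python) =====
-- from collections import deque
--
-- def pocztapolska(line):
--     kolejka = deque(line)
--     leaving_clients = []
--
--     while kolejka:
--         name, sending = kolejka.popleft()
--         if sending:
--             kolejka.append((name, False))
--         else:
--             leaving_clients.append(name)
--     return leaving_clients
-- ===== SOURCE B (Python) =====
-- def pocztapolska(line):
--     # Two-pass stable partition: non-senders first, then senders (no queue simulation).
--     return [name for name, sending in line if not sending] + \
--            [name for name, sending in line if sending]
-- ===== Notes on version B (the rewrite author's own statement) =====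
-- stated objective: simpler
-- what changed: Replaces the deque simulation with re-queuing by a direct stable two-list partition (non-senders in order, then senders in order).
import Mathlib
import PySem

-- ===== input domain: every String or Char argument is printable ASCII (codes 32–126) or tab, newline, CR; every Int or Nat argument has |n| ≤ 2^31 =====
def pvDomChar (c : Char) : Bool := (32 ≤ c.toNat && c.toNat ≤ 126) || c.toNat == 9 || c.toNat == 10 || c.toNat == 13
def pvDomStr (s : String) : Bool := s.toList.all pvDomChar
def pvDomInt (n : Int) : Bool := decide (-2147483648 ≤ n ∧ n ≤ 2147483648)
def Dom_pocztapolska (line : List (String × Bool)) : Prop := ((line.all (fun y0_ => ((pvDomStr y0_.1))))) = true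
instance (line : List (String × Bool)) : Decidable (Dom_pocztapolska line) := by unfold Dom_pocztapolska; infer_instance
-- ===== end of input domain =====

-- B replaces A's deque simulation (re-queuing senders with the flag cleared) by a
-- direct stable two-list partition: non-senders in order, then senders in order.

-- ===== PORT A =====
-- Queue loop: pop front; if sending, re-append with False; else record name.
def pocztaLoop (kolejka : List (String × Bool)) (leaving : List String) : List String :=
  match kolejka with
  | [] => leaving
  | (name, sending) :: rest =>
    if sending then pocztaLoop (rest ++ [(name, false)]) leaving
    else pocztaLoop rest (leaving ++ [name])
termination_by kolejka.length + kolejka.countP (fun p => p.2)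
decreasing_by
  all_goals simp_all [List.countP_append]

def pocztapolska (line : List (String × Bool)) : List String :=
  pocztaLoop line []

-- ===== PORT B =====
def pocztapolska_alt (line : List (String × Bool)) : List String :=
  ((line.filter (fun p => !p.2)).map Prod.fst) ++ ((line.filter (fun p => p.2)).map Prod.fst)

-- ===== PRECONDITION & SPEC =====
def Spec_pocztapolska (line : List (String × Bool)) (out : List String) : Prop :=
  out = pocztapolska_alt line

instance (line : List (String × Bool)) (out : List String) : Decidable (Spec_pocztapolska line out) := by
  unfold Spec_pocztapolska; infer_instance

-- ===== CLAIM =====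
def Claim_equal_pocztapolska : Prop :=
  ∀ (line : List (String × Bool)), Dom_pocztapolska line → Spec_pocztapolska line (pocztapolska line)

-- ===== LEMMAS AND PROOFS =====
theorem pocztaLoop_eq (kolejka : List (String × Bool)) (leaving : List String) :
    pocztaLoop kolejka leaving =
      leaving ++ ((kolejka.filter (fun p => !p.2)).map Prod.fst)
              ++ ((kolejka.filter (fun p => p.2)).map Prod.fst) := by
  induction kolejka, leaving using pocztaLoop.induct with
  | case1 => simp [pocztaLoop]
  | case2 leaving name rest ih =>
      rw [pocztaLoop]
      rw [ih]
      simp [List.filter_append]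
  | case3 leaving name sending rest hns ih =>
      rw [pocztaLoop, if_neg hns, ih]
      simp only [Bool.not_eq_true] at hns
      subst hns
      simp

-- ===== VERDICT =====
theorem pocztapolska_spec : Claim_equal_pocztapolska := by
  intro line _
  unfold Spec_pocztapolska pocztapolska pocztapolska_alt
  rw [pocztaLoop_eq]
  rfl
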